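-- pv_equiv track=rewrite | github.com/Simransingh010/KrishiGPT | backend/app/krishi/safety.py | sanitize_ai_response
-- ===== SOURCE A (Python) =====
-- BANNED_CHEMICALS_INDIA = {
--     "endosulfan",
--     "monocrotophos",
--     "phosphamidon",
--     "methyl parathion",
--     "triazophos",
--     "dichlorvos",
--     "phorate",
--     "carbofuran",
--     "methomyl",
--     "alachlor",
--     "dicofol",
--     "mancozeb",  # Restricted in some states
-- }
--
-- def sanitize_ai_response(response: str) -> str:
--     """
--     Remove potentially dangerous advice from AI response.
--     """
--     # Check for banned chemicals mentioned
--     response_lower = response.lower()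
--
--     for chemical in BANNED_CHEMICALS_INDIA:
--         if chemical in response_lower:
--             response = response.replace(
--                 chemical,
--                 f"[BANNED: {chemical}]"
--             )
--             response = response.replace(
--                 chemical.title(),
--                 f"[BANNED: {chemical.title()}]"
--             )
--
--     return response
-- ===== SOURCE B (Python) =====
-- # Single left-to-right scan: at each position replace the first matching banned
-- # spelling (lowercase or Title-case) instead of A's 12 conditional replace passes.
-- _CHEMICALS = [
--     "endosulfan",
--     "monocrotophos",
--     "phosphamidon",
--     "methyl parathion",
--     "triazophos",
--     "dichlorvos",
--     "phorate",
--     "carbofuran",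
--     "methomyl",
--     "alachlor",
--     "dicofol",
--     "mancozeb",
-- ]
--
-- _PATTERNS = [p for c in _CHEMICALS for p in (c, c.title())]
--
--
-- def sanitize_ai_response(response: str) -> str:
--     """
--     Remove potentially dangerous advice from AI response.
--     """
--     out = []
--     i = 0
--     n = len(response)
--     while i < n:
--         for p in _PATTERNS:
--             if response.startswith(p, i):
--                 out.append("[BANNED: " + p + "]")
--                 i += len(p)
--                 break
--         else:
--             out.append(response[i])
--             i += 1
--     return "".join(out)
-- ===== Notes on version B (the rewrite author's own statement) =====
-- stated objective: alternative
-- what changed: Replaces A's loop of up to 24 whole-string str.replace passes (one per banned spelling) by one left-to-right scan that rewrites the first banned spelling matching at each position.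
import Mathlib
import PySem

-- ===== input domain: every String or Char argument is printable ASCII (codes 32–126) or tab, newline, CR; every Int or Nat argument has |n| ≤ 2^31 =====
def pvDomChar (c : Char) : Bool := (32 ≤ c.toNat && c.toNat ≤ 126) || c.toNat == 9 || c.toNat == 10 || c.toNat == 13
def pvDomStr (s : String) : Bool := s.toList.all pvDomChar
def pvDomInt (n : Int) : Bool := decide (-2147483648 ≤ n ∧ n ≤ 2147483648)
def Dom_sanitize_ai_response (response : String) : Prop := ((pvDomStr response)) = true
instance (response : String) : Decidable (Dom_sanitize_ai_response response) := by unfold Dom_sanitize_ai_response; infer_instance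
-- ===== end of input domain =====

-- B replaces A's loop of up to 24 whole-string str.replace passes by one left-to-right
-- scan that rewrites the first banned spelling matching at each position (objective: alternative).

-- ===== PORT A =====

def pvChems : List String :=
  ["endosulfan", "monocrotophos", "phosphamidon", "methyl parathion", "triazophos",
   "dichlorvos", "phorate", "carbofuran", "methomyl", "alachlor", "dicofol", "mancozeb"]

-- Python str.title(), hand-ported (not in PySem): exact on ASCII text, where a letter is
-- uppercased iff not preceded by a letter and lowercased otherwise.
def pyTitleChars : Bool → List Char → List Char
  | _, [] => []
  | prev, c :: t =>
      (if PySem.Chars.isalpha c then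
         (if prev then PySem.Chars.lowerChar c else PySem.Chars.upperChar c)
       else c) :: pyTitleChars (PySem.Chars.isalpha c) t

def pyTitle (s : String) : String := String.ofList (pyTitleChars false s.toList)

def sanitize_ai_response (response : String) : String :=
  let response_lower := PySem.Str.lower response
  (PySem.Set.ofList pvChems).foldl
    (fun resp chemical =>
      if PySem.Str.isIn chemical response_lower then
        PySem.Str.replace
          (PySem.Str.replace resp chemical ("[BANNED: " ++ chemical ++ "]"))
          (pyTitle chemical) ("[BANNED: " ++ pyTitle chemical ++ "]")
      else resp)
    response

-- ===== PORT B =====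

def pvChemsAlt : List String :=
  ["endosulfan", "monocrotophos", "phosphamidon", "methyl parathion", "triazophos",
   "dichlorvos", "phorate", "carbofuran", "methomyl", "alachlor", "dicofol", "mancozeb"]

-- _PATTERNS = [p for c in _CHEMICALS for p in (c, c.title())]
def pvPatternsAlt : List (List Char) :=
  pvChemsAlt.flatMap (fun c => [c.toList, pyTitleChars false c.toList])

-- Source B's while loop over positions: at each position emit the rewrite of the first
-- pattern that matches there (for/startswith/break), else copy the character.
-- (Source B advances i += len(p) on a match; since the match starts here, that is
-- dropping len(p) - 1 further characters after the head.)
def pvScan (P : List (List Char)) : List Char → List Char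
  | [] => []
  | c :: t =>
    match P.find? (fun p => p.isPrefixOf (c :: t)) with
    | some p => "[BANNED: ".toList ++ p ++ "]".toList ++ pvScan P (t.drop (p.length - 1))
    | none => c :: pvScan P t
termination_by s => s.length
decreasing_by
  all_goals simp

def sanitize_ai_response_alt (response : String) : String :=
  String.ofList (pvScan pvPatternsAlt response.toList)

-- ===== PRECONDITION & SPEC =====

def pvJunctions : List String :=
  ["phoratendosulfan", "Phoratendosulfan", "monocrotophosphamidon", "Monocrotophosphamidon",
   "triazophosphamidon", "Triazophosphamidon"]

-- Pre_ excludes strings containing one of the six overlap junctions above, on which two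
-- banned-name occurrences overlap in the text and A's result is not even deterministic:
-- it depends on Python's randomized set iteration order (which occurrence is replaced first).
def Pre_sanitize_ai_response (response : String) : Prop :=
  ∀ j ∈ pvJunctions, PySem.Str.isIn j response = false

instance (response : String) : Decidable (Pre_sanitize_ai_response response) := by
  unfold Pre_sanitize_ai_response; infer_instance

def pvWitness_sanitize_ai_response : String := "Never spray Monocrotophos or endosulfan."

def Spec_sanitize_ai_response (response : String) (out : String) : Prop :=
  out = sanitize_ai_response_alt response

instance (response : String) (out : String) : Decidable (Spec_sanitize_ai_response response out) := by
  unfold Spec_sanitize_ai_response; infer_instance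

-- ===== CLAIM (what is proved, stated in full; the proofs are below) =====
def Claim_equal_sanitize_ai_response : Prop :=
  ∀ (response : String), Dom_sanitize_ai_response response →
    Pre_sanitize_ai_response response →
      Spec_sanitize_ai_response response (sanitize_ai_response response)

-- ===== LEMMAS AND PROOFS =====

-- the inserted replacement text, at the character level
def pvNew (p : List Char) : List Char := "[BANNED: ".toList ++ p ++ "]".toList

-- simple structural form of CPython str.replace's scan (for a nonempty needle)
def pvRepl (old new : List Char) : List Char → List Char
  | [] => []
  | c :: t =>
    if old.isPrefixOf (c :: t) then new ++ pvRepl old new (t.drop (old.length - 1))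
    else c :: pvRepl old new t
termination_by s => s.length
decreasing_by
  all_goals simp

-- "no occurrence of q can start inside u, whatever follows u"
def pvNoOv (u q : List Char) : Bool :=
  (List.range u.length).all (fun i => !((u.drop i).isPrefixOf q) && !(q.isPrefixOf (u.drop i)))

def pvJunctionsC : List (List Char) := pvJunctions.map String.toList

def PreC (s : List Char) : Prop := ∀ J ∈ pvJunctionsC, ¬ J <:+: s


-- ---- basic prefix utilities ----

theorem pv_prefix_split {α : Type} {q a X : List α} (h : q <+: a ++ X) : q <+: a ∨ a <+: q := by
  rcases h with ⟨r, hr⟩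
  by_cases hl : q.length ≤ a.length
  · left
    have h2 : q = (a ++ X).take q.length := by
      rw [← hr]; simp [List.take_append_of_le_length (le_refl q.length)]
    have h3 : q = a.take q.length := by
      conv_lhs => rw [h2]
      rw [List.take_append_of_le_length hl]
    exact List.prefix_iff_eq_take.mpr h3
  · right
    rw [List.prefix_iff_eq_take]
    have h2 : q = (a ++ X).take q.length := by
      rw [← hr]; simp [List.take_append_of_le_length (le_refl q.length)]
    calc a = (a ++ X).take a.length := by simp
      _ = ((a ++ X).take q.length).take a.length := by
            rw [List.take_take]; congr 1; omega
      _ = q.take a.length := by rw [← h2]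

theorem pv_prefix_drop_eq {α : Type} {p s : List α} (h : p <+: s) :
    s = p ++ s.drop p.length := by
  rcases h with ⟨r, rfl⟩
  simp

theorem pv_drop_cons (c : Char) (t : List Char) (n : Nat) (hn : 0 < n) :
    (c :: t).drop n = t.drop (n - 1) := by
  cases n with
  | zero => omega
  | succ m => simp

-- ---- pvRepl equations and its agreement with PySem.Chars.replace ----

theorem pvRepl_nil (old new : List Char) : pvRepl old new [] = [] := by
  simp [pvRepl]

theorem pvRepl_cons_pos {old : List Char} (new : List Char) {c : Char} {t : List Char}
    (h : old.isPrefixOf (c :: t) = true) :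
    pvRepl old new (c :: t) = new ++ pvRepl old new (t.drop (old.length - 1)) := by
  rw [pvRepl]; simp [h]

theorem pvRepl_cons_neg {old : List Char} (new : List Char) {c : Char} {t : List Char}
    (h : old.isPrefixOf (c :: t) = false) :
    pvRepl old new (c :: t) = c :: pvRepl old new t := by
  rw [pvRepl]; simp [h]

theorem pv_replace_go_eq (old new : List Char) (hold : old ≠ []) :
    ∀ (fuel : Nat) (l acc : List Char), l.length ≤ fuel →
      PySem.Chars.replace.go old new fuel l acc = acc.reverse ++ pvRepl old new l := by
  have hlen : 0 < old.length := by cases old <;> simp_all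
  intro fuel
  induction fuel with
  | zero =>
    intro l acc hl
    have : l = [] := by cases l <;> simp_all
    subst this
    rw [PySem.Chars.replace.go]
    simp [pvRepl_nil]
  | succ n ih =>
    intro l acc hl
    cases l with
    | nil =>
      rw [PySem.Chars.replace.go]
      · simp [pvRepl_nil]
      · omega
    | cons c t =>
      have ht : t.length ≤ n := by simp at hl; omega
      rw [PySem.Chars.replace.go]
      by_cases h : old.isPrefixOf (c :: t) = true
      · simp only [h, if_true]
        have hdrop : (c :: t).drop old.length = t.drop (old.length - 1) :=
          pv_drop_cons c t old.length hlen
        have harg : (t.drop (old.length - 1)).length ≤ n := by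
          simp
          omega
        rw [hdrop, ih (t.drop (old.length - 1)) (new.reverse ++ acc) harg]
        rw [pvRepl_cons_pos new h]
        simp
      · simp only [h]
        rw [ih t (c :: acc) ht]
        rw [pvRepl_cons_neg new (Bool.eq_false_iff.mpr h)]
        simp

theorem pv_replace_eq (s old new : List Char) (hold : old ≠ []) :
    PySem.Chars.replace s old new = pvRepl old new s := by
  rw [PySem.Chars.replace]
  have : old.isEmpty = false := by cases old <;> simp_all
  rw [this]
  simpa using pv_replace_go_eq old new hold s.length s [] (le_refl _)

-- ---- pvNoOv gives: no occurrence of q can start inside u ----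

theorem pv_noOv_not_prefix {u q : List Char} (h : pvNoOv u q = true) {i : Nat}
    (hi : i < u.length) (X : List Char) : ¬ q <+: (u.drop i ++ X) := by
  intro hq
  have hh := (List.all_eq_true.mp h) i (by simpa using hi)
  simp only [Bool.and_eq_true, Bool.not_eq_true'] at hh
  rcases pv_prefix_split hq with h1 | h1
  · exact absurd (List.isPrefixOf_iff_prefix.mpr h1) (by simp [hh.2])
  · exact absurd (List.isPrefixOf_iff_prefix.mpr h1) (by simp [hh.1])

-- ---- skip lemmas: pvRepl and pvScan walk over a match-free block unchanged ----

theorem pv_repl_skip (old new : List Char) :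
    ∀ (u t : List Char), (∀ i < u.length, ¬ old <+: (u.drop i ++ t)) →
      pvRepl old new (u ++ t) = u ++ pvRepl old new t := by
  intro u
  induction u with
  | nil => intro t _; simp
  | cons c u' ih =>
    intro t H
    have h0 : ¬ old <+: ((c :: u') ++ t) := by
      have := H 0 (by simp)
      simpa using this
    have hpf : old.isPrefixOf (c :: (u' ++ t)) = false := by
      rw [Bool.eq_false_iff]
      intro hc
      exact h0 (by simpa using List.isPrefixOf_iff_prefix.mp hc)
    have H' : ∀ i < u'.length, ¬ old <+: (u'.drop i ++ t) := by
      intro i hi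
      have := H (i + 1) (by simp; omega)
      simpa using this
    calc pvRepl old new ((c :: u') ++ t) = pvRepl old new (c :: (u' ++ t)) := by simp
      _ = c :: pvRepl old new (u' ++ t) := pvRepl_cons_neg new hpf
      _ = c :: (u' ++ pvRepl old new t) := by rw [ih t H']
      _ = (c :: u') ++ pvRepl old new t := by simp

theorem pvScan_nil (P : List (List Char)) : pvScan P [] = [] := by simp [pvScan]

theorem pvScan_cons_some {P : List (List Char)} {c : Char} {t : List Char} {p : List Char}
    (h : P.find? (fun p => p.isPrefixOf (c :: t)) = some p) :
    pvScan P (c :: t) = pvNew p ++ pvScan P (t.drop (p.length - 1)) := by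
  rw [pvScan, h]
  simp [pvNew]

theorem pvScan_cons_none {P : List (List Char)} {c : Char} {t : List Char}
    (h : P.find? (fun p => p.isPrefixOf (c :: t)) = none) :
    pvScan P (c :: t) = c :: pvScan P t := by
  rw [pvScan, h]

theorem pv_scan_skip (P : List (List Char)) :
    ∀ (u t : List Char), (∀ p ∈ P, ∀ i < u.length, ¬ p <+: (u.drop i ++ t)) →
      pvScan P (u ++ t) = u ++ pvScan P t := by
  intro u
  induction u with
  | nil => intro t _; simp
  | cons c u' ih =>
    intro t H
    have hnone : P.find? (fun p => p.isPrefixOf (c :: (u' ++ t))) = none := by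
      rw [List.find?_eq_none]
      intro p hp
      simp only [Bool.not_eq_true]
      rw [Bool.eq_false_iff]
      intro hc
      have hH := H p hp 0 (by simp)
      simp only [List.drop_zero, List.cons_append] at hH
      exact hH (List.isPrefixOf_iff_prefix.mp hc)
    have H' : ∀ p ∈ P, ∀ i < u'.length, ¬ p <+: (u'.drop i ++ t) := by
      intro p hp i hi
      have := H p hp (i + 1) (by simp; omega)
      simpa using this
    calc pvScan P ((c :: u') ++ t) = pvScan P (c :: (u' ++ t)) := by simp
      _ = c :: pvScan P (u' ++ t) := pvScan_cons_none hnone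
      _ = c :: (u' ++ pvScan P t) := by rw [ih t H']
      _ = (c :: u') ++ pvScan P t := by simp

-- ---- appending patterns that never occur does not change the scan ----

theorem pv_scan_unused (P M : List (List Char)) (hne : ∀ p ∈ P, p ≠ []) :
    ∀ (n : Nat) (s : List Char), s.length ≤ n →
      (∀ p ∈ M, ∀ j, ¬ p <+: s.drop j) →
      pvScan (P ++ M) s = pvScan P s := by
  intro n
  induction n with
  | zero =>
    intro s hs _
    have : s = [] := by cases s <;> simp_all
    subst this; simp [pvScan_nil]
  | succ m ih =>
    intro s hs H
    cases s with
    | nil => simp [pvScan_nil]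
    | cons c t =>
      have hMnone : M.find? (fun p => p.isPrefixOf (c :: t)) = none := by
        rw [List.find?_eq_none]
        intro p hp
        simp only [Bool.not_eq_true]
        rw [Bool.eq_false_iff]
        intro hc
        have hH := H p hp 0
        simp only [List.drop_zero] at hH
        exact hH (List.isPrefixOf_iff_prefix.mp hc)
      cases hf : P.find? (fun p => p.isPrefixOf (c :: t)) with
      | some p =>
        have hfa : (P ++ M).find? (fun p => p.isPrefixOf (c :: t)) = some p := by
          rw [List.find?_append, hf]; rfl
        rw [pvScan_cons_some hf, pvScan_cons_some hfa]
        have hp : p ∈ P := List.mem_of_find?_eq_some hf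
        have hplen : 0 < p.length := by
          have := hne p hp; cases p <;> simp_all
        have hdrops : t.drop (p.length - 1) = (c :: t).drop p.length :=
          (pv_drop_cons c t p.length hplen).symm
        congr 1
        apply ih
        · simp at hs ⊢; omega
        · intro q hq j
          rw [hdrops, List.drop_drop]
          exact H q hq (p.length + j)
      | none =>
        have hfa : (P ++ M).find? (fun p => p.isPrefixOf (c :: t)) = none := by
          rw [List.find?_append, hf, hMnone]; rfl
        rw [pvScan_cons_none hf, pvScan_cons_none hfa]
        congr 1
        apply ih
        · simp at hs ⊢; omega
        · intro q hq j
          have := H q hq (1 + j)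
          rw [← List.drop_drop] at this
          simpa using this

-- ---- a pattern absent from s stays absent from the scanned result ----

theorem pv_scan_not_prefix (P : List (List Char)) :
    ∀ (n : Nat) (s q : List Char), s.length ≤ n → q ≠ [] → '[' ∉ q →
      ¬ q <+: s → ¬ q <+: pvScan P s := by
  intro n
  induction n with
  | zero =>
    intro s q hs hq _ hns
    have : s = [] := by cases s <;> simp_all
    subst this; simpa [pvScan_nil] using hns
  | succ m ih =>
    intro s q hs hq hbr hns
    cases s with
    | nil => simpa [pvScan_nil] using hns
    | cons c t =>
      cases hf : P.find? (fun p => p.isPrefixOf (c :: t)) with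
      | some p =>
        rw [pvScan_cons_some hf]
        intro hpre
        rcases q with _ | ⟨q0, q'⟩
        · exact hq rfl
        · have hq0 : q0 = '[' := by
            have heq : pvNew p ++ pvScan P (t.drop (p.length - 1)) =
                '[' :: ("BANNED: ".toList ++ p ++ "]".toList ++ pvScan P (t.drop (p.length - 1))) := by
              simp [pvNew]
            rw [heq] at hpre
            exact (List.cons_prefix_cons.mp hpre).1
          exact hbr (by simp [hq0])
      | none =>
        rw [pvScan_cons_none hf]
        intro hpre
        rcases q with _ | ⟨q0, q'⟩
        · exact hq rfl
        · rcases List.cons_prefix_cons.mp hpre with ⟨rfl, hq'⟩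
          rcases q' with _ | ⟨q1, q''⟩
          · exact hns (by simp)
          · have hq't : ¬ (q1 :: q'') <+: t := by
              intro hcon
              exact hns (List.cons_prefix_cons.mpr ⟨rfl, hcon⟩)
            exact ih t (q1 :: q'') (by simp at hs ⊢; omega) (by simp)
              (fun hmem => hbr (by simp [hmem])) hq't hq'

-- ---- decided facts about the concrete pattern set ----

set_option maxHeartbeats 2000000 in
theorem pv_fact_nodup : pvPatternsAlt.Nodup := by decide

theorem pv_fact_ne_nil : ∀ p ∈ pvPatternsAlt, p ≠ [] := by decide

theorem pv_fact_no_bracket : ∀ p ∈ pvPatternsAlt, '[' ∉ p := by decide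

set_option maxHeartbeats 4000000 in
theorem pv_fact_noOv_new : ∀ p ∈ pvPatternsAlt, ∀ q ∈ pvPatternsAlt, p ≠ q →
    pvNoOv (pvNew p) q = true := by decide

set_option maxHeartbeats 4000000 in
theorem pv_fact_infix_free : ∀ p ∈ pvPatternsAlt, ∀ q ∈ pvPatternsAlt, p ≠ q →
    ¬ p <:+: q := by decide

set_option maxHeartbeats 4000000 in
theorem pv_fact_junction : ∀ q ∈ pvPatternsAlt, ∀ p ∈ pvPatternsAlt, p ≠ q →
    ∀ i < q.length, 0 < i → (q.drop i).isPrefixOf p = true →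
      (q ++ p.drop (q.length - i)) ∈ pvJunctionsC := by decide

def pvChemsC : List (List Char) := pvChems.map String.toList

theorem pv_fact_lower : ∀ c ∈ pvChemsC,
    PySem.Chars.lower c = c ∧ PySem.Chars.lower (pyTitleChars false c) = c := by decide

theorem pv_fact_patterns : pvPatternsAlt = pvChemsC.flatMap (fun c => [c, pyTitleChars false c]) := by
  decide

theorem pv_fact_chems_nodup : pvChems.Nodup := by decide

theorem pv_fact_chems_ne_nil : ∀ c ∈ pvChems, c.toList ≠ [] := by decide

-- ---- PreC closure under drop ----

theorem pv_preC_drop {s : List Char} (h : PreC s) (n : Nat) : PreC (s.drop n) := by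
  intro J hJ hinf
  exact h J hJ (hinf.trans (List.drop_suffix n s).isInfix)

-- ---- the key lemma: one replace pass folds into the scan ----

theorem pv_key (A B' : List (List Char)) (q : List Char)
    (hP : pvPatternsAlt = A ++ q :: B') :
    ∀ (n : Nat) (s : List Char), s.length ≤ n → PreC s →
      pvRepl q (pvNew q) (pvScan A s) = pvScan (A ++ [q]) s := by
  have hqP : q ∈ pvPatternsAlt := by rw [hP]; simp
  have hqne : q ≠ [] := pv_fact_ne_nil q hqP
  have hqlen : 0 < q.length := by cases q <;> simp_all
  have hqbr : '[' ∉ q := pv_fact_no_bracket q hqP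
  have hqnotA : q ∉ A := by
    have hd := pv_fact_nodup
    rw [hP, List.nodup_middle] at hd
    exact fun hmem => (List.nodup_cons.mp hd).1 (by simp [hmem])
  have hAP : ∀ p ∈ A, p ∈ pvPatternsAlt ∧ p ≠ q := by
    intro p hp
    refine ⟨by rw [hP]; exact List.mem_append_left _ hp, ?_⟩
    intro h; subst h; exact hqnotA hp
  intro n
  induction n with
  | zero =>
    intro s hs _
    have : s = [] := by cases s <;> simp_all
    subst this; simp [pvScan_nil, pvRepl_nil]
  | succ m ih =>
    intro s hs hPre
    cases s with
    | nil => simp [pvScan_nil, pvRepl_nil]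
    | cons c t =>
      cases hf : A.find? (fun p => p.isPrefixOf (c :: t)) with
      | some p =>
        -- a pattern of A matches here: both sides emit its rewrite and continue
        have hpA : p ∈ A := List.mem_of_find?_eq_some hf
        have hpP := (hAP p hpA).1
        have hpq := (hAP p hpA).2
        have hplen : 0 < p.length := by
          have := pv_fact_ne_nil p hpP; cases p <;> simp_all
        have hfa : (A ++ [q]).find? (fun p => p.isPrefixOf (c :: t)) = some p := by
          rw [List.find?_append, hf]; rfl
        rw [pvScan_cons_some hf, pvScan_cons_some hfa]
        rw [pv_repl_skip q (pvNew q) (pvNew p) _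
          (fun i hi => pv_noOv_not_prefix (pv_fact_noOv_new p hpP q hqP hpq) hi _)]
        congr 1
        have hdrops : t.drop (p.length - 1) = (c :: t).drop p.length :=
          (pv_drop_cons c t p.length hplen).symm
        apply ih
        · simp at hs ⊢; omega
        · rw [hdrops]; exact pv_preC_drop hPre p.length
      | none =>
        by_cases hq : q <+: (c :: t)
        · -- q matches here (and by Pre_ no pattern of A overlaps the occurrence)
          have hsplit : (c :: t) = q ++ (c :: t).drop q.length := pv_prefix_drop_eq hq
          have hskip : pvScan A (q ++ (c :: t).drop q.length) =
              q ++ pvScan A ((c :: t).drop q.length) := by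
            apply pv_scan_skip
            intro p hp i hi hpre
            have hpP := (hAP p hp).1
            have hpq := (hAP p hp).2
            rcases pv_prefix_split hpre with h1 | h1
            · -- p would sit inside q: infix of a pattern, impossible
              exact pv_fact_infix_free p hpP q hqP hpq
                (h1.isInfix.trans (List.drop_suffix i q).isInfix)
            · rcases Nat.eq_zero_or_pos i with hi0 | hipos
              · subst hi0
                simp only [List.drop_zero] at h1
                exact pv_fact_infix_free q hqP p hpP (fun h => hpq h.symm) h1.isInfix
              · -- genuine overlap: the junction string occurs in s, contradicting Pre_
                have hJ : (q ++ p.drop (q.length - i)) ∈ pvJunctionsC :=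
                  pv_fact_junction q hqP p hpP hpq i hi hipos
                    (List.isPrefixOf_iff_prefix.mpr h1)
                have hlen1 : (q.drop i).length = q.length - i := by simp
                have hpeq : p = q.drop i ++ p.drop (q.length - i) := by
                  have h3 := pv_prefix_drop_eq h1
                  rw [hlen1] at h3; exact h3
                obtain ⟨r, hr⟩ := hpre
                rw [hpeq, List.append_assoc] at hr
                have hrt : p.drop (q.length - i) ++ r = (c :: t).drop q.length :=
                  List.append_cancel_left hr
                have hJpre : (q ++ p.drop (q.length - i)) <+: (c :: t) := by
                  rw [hsplit, ← hrt]
                  exact ⟨r, by simp⟩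
                exact hPre _ hJ hJpre.isInfix
          have hL : pvScan A (c :: t) = q ++ pvScan A ((c :: t).drop q.length) := by
            conv_lhs => rw [hsplit]
            exact hskip
          have hreq : ∀ X : List Char,
              pvRepl q (pvNew q) (q ++ X) = pvNew q ++ pvRepl q (pvNew q) X := by
            intro X
            cases q with
            | nil => exact absurd rfl hqne
            | cons q0 q' =>
              have hpf : (q0 :: q').isPrefixOf (q0 :: (q' ++ X)) = true :=
                List.isPrefixOf_iff_prefix.mpr
                  (List.cons_prefix_cons.mpr ⟨rfl, List.prefix_append _ _⟩)
              calc pvRepl (q0 :: q') (pvNew (q0 :: q')) ((q0 :: q') ++ X)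
                  = pvRepl (q0 :: q') (pvNew (q0 :: q')) (q0 :: (q' ++ X)) := by simp
                _ = pvNew (q0 :: q') ++
                      pvRepl (q0 :: q') (pvNew (q0 :: q')) ((q' ++ X).drop ((q0 :: q').length - 1)) :=
                    pvRepl_cons_pos _ hpf
                _ = pvNew (q0 :: q') ++ pvRepl (q0 :: q') (pvNew (q0 :: q')) X := by simp
          have hfa : (A ++ [q]).find? (fun p => p.isPrefixOf (c :: t)) = some q := by
            rw [List.find?_append, hf]
            simp [List.isPrefixOf_iff_prefix.mpr hq]
          rw [hL, hreq, pvScan_cons_some hfa]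
          congr 1
          have hdrops : t.drop (q.length - 1) = (c :: t).drop q.length :=
            (pv_drop_cons c t q.length hqlen).symm
          rw [hdrops]
          apply ih
          · simp at hs ⊢
            have : ((c :: t).drop q.length).length = t.length + 1 - q.length := by simp
            omega
          · exact pv_preC_drop hPre q.length
        · -- no pattern at all matches here: both sides copy the character
          have hscnA : pvScan A (c :: t) = c :: pvScan A t := pvScan_cons_none hf
          have hnsc : ¬ q <+: pvScan A (c :: t) :=
            pv_scan_not_prefix A (m + 1) (c :: t) q hs hqne hqbr hq
          rw [hscnA] at hnsc ⊢
          have hpf : q.isPrefixOf (c :: pvScan A t) = false := by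
            rw [Bool.eq_false_iff]
            intro hc
            exact hnsc (List.isPrefixOf_iff_prefix.mp hc)
          rw [pvRepl_cons_neg (pvNew q) hpf]
          have hfa : (A ++ [q]).find? (fun p => p.isPrefixOf (c :: t)) = none := by
            rw [List.find?_append, hf]
            simp only [Option.none_or]
            rw [List.find?_eq_none]
            intro p hp
            simp only [List.mem_singleton] at hp
            subst hp
            simpa using fun hc => hq (List.isPrefixOf_iff_prefix.mp hc)
          rw [pvScan_cons_none hfa]
          rw [ih t (by simp at hs ⊢; omega) (pv_preC_drop hPre 1)]


-- ---- the scan with no patterns is the identity ----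

theorem pv_scan_no_patterns : ∀ s : List Char, pvScan [] s = s := by
  intro s
  induction s with
  | nil => simp [pvScan_nil]
  | cons c t ih => rw [pvScan_cons_none (by simp)]; rw [ih]

-- ---- pyTitleChars preserves length ----

theorem pv_title_length : ∀ (b : Bool) (l : List Char), (pyTitleChars b l).length = l.length := by
  intro b l
  induction l generalizing b with
  | nil => simp [pyTitleChars]
  | cons c t ih => simp [pyTitleChars, ih]

-- ---- the guarded body of A's loop, at the character level ----

def pvStep (s0 : List Char) (acc : List Char) (c : List Char) : List Char :=
  if PySem.Chars.isIn c (PySem.Chars.lower s0) then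
    pvRepl (pyTitleChars false c) (pvNew (pyTitleChars false c)) (pvRepl c (pvNew c) acc)
  else acc

-- ---- folding A's whole loop into the multi-pattern scan ----

theorem pv_chain : ∀ (cs A : List (List Char)) (s : List Char),
    PreC s → (∀ c ∈ cs, c ∈ pvChemsC) →
    pvPatternsAlt = A ++ cs.flatMap (fun c => [c, pyTitleChars false c]) →
    cs.foldl (pvStep s) (pvScan A s) = pvScan pvPatternsAlt s := by
  intro cs
  induction cs with
  | nil =>
    intro A s _ _ hP
    simp only [List.flatMap_nil, List.append_nil] at hP
    simp [hP]
  | cons c cs' ih =>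
    intro A s hPre hcs hP
    have hcC : c ∈ pvChemsC := hcs c (by simp)
    have hP1 : pvPatternsAlt =
        A ++ c :: (pyTitleChars false c :: cs'.flatMap (fun c => [c, pyTitleChars false c])) := by
      simpa using hP
    have hP2 : pvPatternsAlt =
        (A ++ [c]) ++ pyTitleChars false c :: cs'.flatMap (fun c => [c, pyTitleChars false c]) := by
      rw [hP1]; simp
    have hP3 : pvPatternsAlt =
        (A ++ [c] ++ [pyTitleChars false c]) ++ cs'.flatMap (fun c => [c, pyTitleChars false c]) := by
      rw [hP2]; simp
    have hcP : c ∈ pvPatternsAlt := by rw [hP1]; simp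
    have htlP : pyTitleChars false c ∈ pvPatternsAlt := by rw [hP2]; simp
    simp only [List.foldl_cons]
    have hstep : pvStep s (pvScan A s) c = pvScan (A ++ [c] ++ [pyTitleChars false c]) s := by
      rw [pvStep]
      by_cases g : PySem.Chars.isIn c (PySem.Chars.lower s) = true
      · rw [if_pos g]
        rw [pv_key A _ c hP1 s.length s (le_refl _) hPre]
        rw [pv_key (A ++ [c]) _ (pyTitleChars false c) hP2 s.length s (le_refl _) hPre]
      · rw [if_neg g]
        have habs : ∀ p ∈ [c, pyTitleChars false c], ∀ j, ¬ p <+: s.drop j := by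
          intro p hp j hpre
          have hlow : PySem.Chars.lower p = c := by
            rcases List.mem_cons.mp hp with rfl | hp'
            · exact (pv_fact_lower p hcC).1
            · have hptl : p = pyTitleChars false c := by simpa using hp'
              subst hptl
              exact (pv_fact_lower c hcC).2
          have h2 := hpre.map PySem.Chars.lowerChar
          have h1 : PySem.Chars.lower p <+: (PySem.Chars.lower s).drop j := by
            simpa [PySem.Chars.lower, List.map_drop] using h2
          have h3 : PySem.Chars.isIn (PySem.Chars.lower p) (PySem.Chars.lower s) = true :=
            (PySem.Chars.exists_prefix_drop_iff_isIn _ _).mp ⟨j, h1⟩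
          rw [hlow] at h3
          exact g h3
        have hne : ∀ p ∈ A, p ≠ [] := by
          intro p hp
          exact pv_fact_ne_nil p (by rw [hP1]; exact List.mem_append_left _ hp)
        rw [List.append_assoc]
        exact (pv_scan_unused A ([c] ++ [pyTitleChars false c]) hne s.length s (le_refl _)
          (by simpa using habs)).symm
    rw [hstep]
    exact ih (A ++ [c] ++ [pyTitleChars false c]) s hPre
      (fun x hx => hcs x (by simp [hx])) hP3


-- ---- bridging A's String-level fold to the character level ----

theorem pv_bridge (r0 : String) : ∀ (cs : List String) (x : String),
    (∀ ch ∈ cs, ch.toList ≠ []) →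
    cs.foldl (fun resp chemical =>
      if PySem.Str.isIn chemical (PySem.Str.lower r0) then
        PySem.Str.replace (PySem.Str.replace resp chemical ("[BANNED: " ++ chemical ++ "]"))
          (pyTitle chemical) ("[BANNED: " ++ pyTitle chemical ++ "]")
      else resp) x
    = String.ofList ((cs.map String.toList).foldl (pvStep r0.toList) x.toList) := by
  intro cs
  induction cs with
  | nil => intro x _; simp
  | cons ch cs' ih =>
    intro x hne
    have hchne : ch.toList ≠ [] := hne ch (by simp)
    have htlne : pyTitleChars false ch.toList ≠ [] := by
      intro h
      have := pv_title_length false ch.toList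
      rw [h] at this
      exact hchne (List.eq_nil_of_length_eq_zero this.symm)
    simp only [List.foldl_cons, List.map_cons]
    have hg : PySem.Str.isIn ch (PySem.Str.lower r0)
        = PySem.Chars.isIn ch.toList (PySem.Chars.lower r0.toList) := by
      rw [PySem.Str.isIn, PySem.Str.toList_lower]
    have hstep : (if PySem.Str.isIn ch (PySem.Str.lower r0) then
        PySem.Str.replace (PySem.Str.replace x ch ("[BANNED: " ++ ch ++ "]"))
          (pyTitle ch) ("[BANNED: " ++ pyTitle ch ++ "]")
      else x) = String.ofList (pvStep r0.toList x.toList ch.toList) := by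
      by_cases g : PySem.Chars.isIn ch.toList (PySem.Chars.lower r0.toList) = true
      · have hR : pvStep r0.toList x.toList ch.toList
            = pvRepl (pyTitleChars false ch.toList) (pvNew (pyTitleChars false ch.toList))
                (pvRepl ch.toList (pvNew ch.toList) x.toList) := by
          rw [pvStep, if_pos g]
        have hinner : (PySem.Str.replace x ch ("[BANNED: " ++ ch ++ "]")).toList
            = pvRepl ch.toList (pvNew ch.toList) x.toList := by
          rw [PySem.Str.toList_replace, pv_replace_eq _ _ _ hchne]
          congr 1
          simp [pvNew, String.toList_append]
        have houter : (PySem.Str.replace (PySem.Str.replace x ch ("[BANNED: " ++ ch ++ "]"))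
            (pyTitle ch) ("[BANNED: " ++ pyTitle ch ++ "]")).toList
            = pvRepl (pyTitleChars false ch.toList) (pvNew (pyTitleChars false ch.toList))
                (pvRepl ch.toList (pvNew ch.toList) x.toList) := by
          rw [PySem.Str.toList_replace]
          rw [pv_replace_eq _ _ _ (by rw [pyTitle, String.toList_ofList]; exact htlne)]
          rw [hinner]
          congr 1
          · rw [pyTitle, String.toList_ofList]
          · simp [pvNew, String.toList_append, pyTitle, String.toList_ofList]
        rw [if_pos (by rw [hg]; exact g), hR, ← houter, String.ofList_toList]
      · have hR : pvStep r0.toList x.toList ch.toList = x.toList := by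
          rw [pvStep, if_neg g]
        rw [if_neg (by rw [hg]; exact g), hR, String.ofList_toList]
    rw [hstep, ih _ (fun c hc => hne c (by simp [hc])), String.toList_ofList]

-- ---- assembling the final equivalence ----

theorem pv_main (r : String) (hPre : Pre_sanitize_ai_response r) :
    sanitize_ai_response r = sanitize_ai_response_alt r := by
  have hPreC : PreC r.toList := by
    intro J hJ hinf
    have : ∃ j ∈ pvJunctions, j.toList = J := by
      simpa [pvJunctionsC] using hJ
    obtain ⟨j, hjmem, rfl⟩ := this
    have := hPre j hjmem
    rw [PySem.Str.isIn] at this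
    exact (PySem.Chars.isIn_eq_false_iff _ _).mp this hinf
  have h0 : sanitize_ai_response r = (PySem.Set.ofList pvChems).foldl
      (fun resp chemical =>
        if PySem.Str.isIn chemical (PySem.Str.lower r) then
          PySem.Str.replace (PySem.Str.replace resp chemical ("[BANNED: " ++ chemical ++ "]"))
            (pyTitle chemical) ("[BANNED: " ++ pyTitle chemical ++ "]")
        else resp) r := rfl
  rw [h0, PySem.Set.ofList_eq_self_of_nodup pvChems pv_fact_chems_nodup]
  rw [pv_bridge r pvChems r pv_fact_chems_ne_nil]
  have hchain := pv_chain pvChemsC [] r.toList hPreC (fun c hc => hc)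
    (by simpa using pv_fact_patterns)
  rw [pv_scan_no_patterns] at hchain
  rw [show pvChems.map String.toList = pvChemsC from rfl, hchain]
  rfl

-- ===== VERDICT (by name: the statement is the Claim_ definition above) =====
theorem sanitize_ai_response_spec : Claim_equal_sanitize_ai_response := by
  intro response _ hPre
  unfold Spec_sanitize_ai_response
  exact pv_main response hPre
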